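-- pv_equiv track=rewrite | github.com/sahilambre/Fundamentals-of-Computing | Code/Homework/hw5.py | twoMaxes
-- ===== SOURCE A (Python) =====
-- def twoMaxes(L):
--     new_l = [[],[]]
--
--     for i in range(len(L)):
--         row_max = 0
--         for j in range(len(L[i])):
--             if L[i][j] > row_max:
--                 row_max = L[i][j]
--         new_l[0].append(row_max)
--
--     row_len = len(L[0])
--     for i in range(row_len):
--         col_max = 0
--         for j in range(len(L)):
--             if L[j][i] > col_max:
--                 col_max = L[j][i]
--         new_l[1].append(col_max)
--
--     return new_l
-- ===== SOURCE B (Python) =====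
-- def twoMaxes(L):
--     n = len(L[0])
--     row_maxes = []
--     col_maxes = [0] * n
--     for row in L:
--         m = 0
--         for v in row:
--             if v > m:
--                 m = v
--         row_maxes.append(m)
--         for k in range(n):
--             if row[k] > col_maxes[k]:
--                 col_maxes[k] = row[k]
--     return [row_maxes, col_maxes]
-- ===== Notes on version B (the rewrite author's own statement) =====
-- stated objective: alternative
-- what changed: A makes two separate index-driven passes (row-major for row maxes, then a column-major pass with L[j][i] indexing for column maxes); B makes one combined row-wise pass, computing each row max by iterating the row's elements and maintaining a running column-max array.
import Mathlib
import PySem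

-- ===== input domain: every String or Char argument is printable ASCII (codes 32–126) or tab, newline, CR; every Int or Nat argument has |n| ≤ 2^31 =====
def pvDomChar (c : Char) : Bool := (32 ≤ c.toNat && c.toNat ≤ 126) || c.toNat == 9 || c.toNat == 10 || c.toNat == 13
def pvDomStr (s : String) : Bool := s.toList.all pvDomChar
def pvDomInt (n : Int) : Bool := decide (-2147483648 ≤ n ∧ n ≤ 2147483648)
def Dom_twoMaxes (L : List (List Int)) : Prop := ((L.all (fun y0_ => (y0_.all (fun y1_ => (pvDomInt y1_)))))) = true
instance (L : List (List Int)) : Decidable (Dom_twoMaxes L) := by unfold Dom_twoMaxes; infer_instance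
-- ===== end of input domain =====

-- B replaces A's two separate row-major/column-major passes by one combined pass over the
-- rows that maintains a running column-max array (alternative decomposition, same cost).
-- ===== PORT A =====
def twoMaxes (L : List (List Int)) : List (List Int) :=
  let rowMaxes := (PySem.List.pyRange 0 L.length 1).foldl
    (fun acc i =>
      let row := PySem.List.pyGetD L i []
      let rm := (PySem.List.pyRange 0 row.length 1).foldl
        (fun m j => if PySem.List.pyGetD row j 0 > m then PySem.List.pyGetD row j 0 else m) 0
      acc ++ [rm]) []
  let rowLen : Nat := (PySem.List.pyGetD L 0 []).length
  let colMaxes := (PySem.List.pyRange 0 rowLen 1).foldl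
    (fun acc i =>
      let cm := (PySem.List.pyRange 0 L.length 1).foldl
        (fun m j =>
          if PySem.List.pyGetD (PySem.List.pyGetD L j []) i 0 > m then
            PySem.List.pyGetD (PySem.List.pyGetD L j []) i 0
          else m) 0
      acc ++ [cm]) []
  [rowMaxes, colMaxes]

-- ===== PORT B =====
def twoMaxes_alt (L : List (List Int)) : List (List Int) :=
  let n : Nat := (PySem.List.pyGetD L 0 []).length
  let p := L.foldl
    (fun (p : List Int × List Int) row =>
      let m := row.foldl (fun m v => if v > m then v else m) 0
      let cols := (PySem.List.pyRange 0 n 1).foldl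
        (fun cs k =>
          if PySem.List.pyGetD row k 0 > PySem.List.pyGetD cs k 0 then
            PySem.List.pySetD cs k (PySem.List.pyGetD row k 0)
          else cs) p.2
      (p.1 ++ [m], cols))
    ([], List.replicate n 0)
  [p.1, p.2]

-- ===== PRECONDITION & SPEC =====
-- Pre_ excludes exactly the inputs on which Python A raises IndexError:
-- the empty matrix (L[0]) and ragged matrices with a row shorter than the first row (L[j][i]).
def Pre_twoMaxes (L : List (List Int)) : Prop :=
  L ≠ [] ∧ ∀ r ∈ L, (L.headD []).length ≤ r.length
instance (L : List (List Int)) : Decidable (Pre_twoMaxes L) := by unfold Pre_twoMaxes; infer_instance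
def pvWitness_twoMaxes : List (List Int) := [[1, -2, 3], [4, 0, -1]]
def Spec_twoMaxes (L : List (List Int)) (out : List (List Int)) : Prop := out = twoMaxes_alt L
instance (L : List (List Int)) (out : List (List Int)) : Decidable (Spec_twoMaxes L out) := by unfold Spec_twoMaxes; infer_instance

-- ===== CLAIM (what is proved, stated in full; the proofs are below) =====
def Claim_equal_twoMaxes : Prop := ∀ (L : List (List Int)), Dom_twoMaxes L → Pre_twoMaxes L → Spec_twoMaxes L (twoMaxes L)

-- ===== LEMMAS AND PROOFS =====


def pvRmx (r : List Int) : Int := r.foldl (fun m v => if v > m then v else m) 0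

def pvUpd (row cs : List Int) (k : Int) : List Int :=
  if PySem.List.pyGetD row k 0 > PySem.List.pyGetD cs k 0 then
    PySem.List.pySetD cs k (PySem.List.pyGetD row k 0)
  else cs

def pvColStep (n : Nat) (cs row : List Int) : List Int :=
  (PySem.List.pyRange 0 n 1).foldl
    (fun cs k =>
      if PySem.List.pyGetD row k 0 > PySem.List.pyGetD cs k 0 then
        PySem.List.pySetD cs k (PySem.List.pyGetD row k 0)
      else cs) cs

def pvColF (L : List (List Int)) (k : Int) (init : Int) : Int :=
  L.foldl (fun m row => if PySem.List.pyGetD row k 0 > m then PySem.List.pyGetD row k 0 else m) init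

theorem pvColStep_eq (n : Nat) (cs row : List Int) :
    pvColStep n cs row = (PySem.List.pyRange 0 n 1).foldl (pvUpd row) cs := rfl

theorem pvInner_row (r : List Int) :
    (PySem.List.pyRange 0 (r.length : Int) 1).foldl
      (fun m j => if PySem.List.pyGetD r j 0 > m then PySem.List.pyGetD r j 0 else m) 0
    = pvRmx r :=
  PySem.List.foldl_pyRange_zero_pyGetD' r 0 (fun m v => if v > m then v else m) 0

theorem pvInner_col (L : List (List Int)) (i : Int) :
    (PySem.List.pyRange 0 (L.length : Int) 1).foldl
      (fun m j =>
        if PySem.List.pyGetD (PySem.List.pyGetD L j []) i 0 > m then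
          PySem.List.pyGetD (PySem.List.pyGetD L j []) i 0
        else m) 0
    = pvColF L i 0 :=
  PySem.List.foldl_pyRange_zero_pyGetD' L []
    (fun m row => if PySem.List.pyGetD row i 0 > m then PySem.List.pyGetD row i 0 else m) 0

-- A in closed form
theorem pvA_eq (L : List (List Int)) :
    twoMaxes L =
      [L.map pvRmx,
       (PySem.List.pyRange 0 ((PySem.List.pyGetD L 0 []).length : Int) 1).map
         (fun i => pvColF L i 0)] := by
  unfold twoMaxes
  simp only [PySem.List.foldl_append_singleton_eq_map, List.nil_append]
  rw [show (fun i => ((PySem.List.pyRange 0 ((PySem.List.pyGetD L i []).length : Int) 1).foldl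
        (fun m j => if PySem.List.pyGetD (PySem.List.pyGetD L i []) j 0 > m then
          PySem.List.pyGetD (PySem.List.pyGetD L i []) j 0 else m) 0))
      = fun i => pvRmx (PySem.List.pyGetD L i []) from funext fun i => pvInner_row _]
  rw [show (fun i => ((PySem.List.pyRange 0 (L.length : Int) 1).foldl
        (fun m j => if PySem.List.pyGetD (PySem.List.pyGetD L j []) i 0 > m then
          PySem.List.pyGetD (PySem.List.pyGetD L j []) i 0 else m) 0))
      = fun i => pvColF L i 0 from funext fun i => pvInner_col L i]
  rw [show ((PySem.List.pyRange 0 (L.length : Int) 1).map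
        (fun i => pvRmx (PySem.List.pyGetD L i [])))
      = L.map pvRmx from ?_]
  have h := PySem.List.map_pyGetD_pyRange_zero' L ([] : List Int)
  calc (PySem.List.pyRange 0 (L.length : Int) 1).map (fun i => pvRmx (PySem.List.pyGetD L i []))
      = ((PySem.List.pyRange 0 (L.length : Int) 1).map (fun i => PySem.List.pyGetD L i [])).map pvRmx := by
        rw [List.map_map]; rfl
    _ = L.map pvRmx := by rw [h]

-- B's pair fold in closed form
theorem pvB_fold (n : Nat) :
    ∀ (Lr : List (List Int)) (a cs : List Int),
      Lr.foldl
        (fun (p : List Int × List Int) row =>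
          let m := row.foldl (fun m v => if v > m then v else m) 0
          let cols := (PySem.List.pyRange 0 n 1).foldl
            (fun cs k =>
              if PySem.List.pyGetD row k 0 > PySem.List.pyGetD cs k 0 then
                PySem.List.pySetD cs k (PySem.List.pyGetD row k 0)
              else cs) p.2
          (p.1 ++ [m], cols)) (a, cs)
      = (a ++ Lr.map pvRmx, Lr.foldl (pvColStep n) cs) := by
  intro Lr
  induction Lr with
  | nil => intro a cs; simp
  | cons r rs ih =>
    intro a cs
    simp only [List.foldl_cons, List.map_cons]
    rw [ih]
    refine Prod.ext ?_ rfl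
    simp [pvRmx]

theorem pvB_eq (L : List (List Int)) :
    twoMaxes_alt L =
      [L.map pvRmx,
       L.foldl (pvColStep (PySem.List.pyGetD L 0 []).length)
         (List.replicate (PySem.List.pyGetD L 0 []).length 0)] := by
  have h := pvB_fold (PySem.List.pyGetD L 0 []).length L []
    (List.replicate (PySem.List.pyGetD L 0 []).length 0)
  unfold twoMaxes_alt
  dsimp only
  rw [h]
  simp

theorem pvUpd_length (row cs : List Int) (k : Int) : (pvUpd row cs k).length = cs.length := by
  unfold pvUpd; split
  · exact PySem.List.length_pySetD cs k _
  · rfl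

-- inner range-fold of B: length preserved, pointwise effect
theorem pvG_spec (row : List Int) (m : Nat) :
    ∀ (a : Nat) (cs : List Int),
      ((PySem.List.pyRange a (a + m : Nat) 1).foldl (pvUpd row) cs).length = cs.length ∧
      ∀ k : Nat, k < cs.length →
        ((PySem.List.pyRange a (a + m : Nat) 1).foldl (pvUpd row) cs).getD k 0 =
          if a ≤ k ∧ k < a + m then
            (if row.getD k 0 > cs.getD k 0 then row.getD k 0 else cs.getD k 0)
          else cs.getD k 0 := by
  induction m with
  | zero =>
    intro a cs
    rw [PySem.List.pyRange_one_eq_nil (by push_cast; omega)]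
    refine ⟨rfl, ?_⟩
    intro k hk
    rw [if_neg (by omega)]
    rfl
  | succ m ih =>
    intro a cs
    have hsplit : PySem.List.pyRange (a : Int) ((a + (m+1) : Nat) : Int) 1
        = PySem.List.pyRange (a : Int) ((a + m : Nat) : Int) 1 ++ [((a + m : Nat) : Int)] := by
      have h2 : ((a + (m+1) : Nat) : Int) = ((a + m : Nat) : Int) + 1 := by push_cast; ring
      rw [h2, PySem.List.pyRange_one_succ_right (by push_cast; omega)]
    rw [hsplit, List.foldl_append]
    obtain ⟨ihlen, ihget⟩ := ih a cs
    set G := (PySem.List.pyRange (a : Int) ((a + m : Nat) : Int) 1).foldl (pvUpd row) cs with hG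
    simp only [List.foldl_cons, List.foldl_nil]
    have hGtop : G.getD (a + m) 0 = cs.getD (a + m) 0 := by
      by_cases h : a + m < cs.length
      · rw [ihget (a + m) h, if_neg (by omega)]
      · rw [List.getD_eq_default _ _ (by omega), List.getD_eq_default _ _ (by omega)]
    have hupd : pvUpd row G ((a + m : Nat) : Int)
        = if row.getD (a + m) 0 > cs.getD (a + m) 0 then
            G.set (a + m) (row.getD (a + m) 0)
          else G := by
      unfold pvUpd
      simp only [PySem.List.pyGetD_natCast, PySem.List.pySetD_natCast, hGtop]
    refine ⟨?_, ?_⟩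
    · rw [pvUpd_length]; exact ihlen
    · intro k hk
      rw [hupd]
      by_cases hkm : k = a + m
      · subst hkm
        by_cases hgt : row.getD (a + m) 0 > cs.getD (a + m) 0
        · rw [if_pos hgt, List.getD_eq_getElem?_getD, List.getElem?_set, if_pos rfl,
            if_pos (by omega : a + m < G.length)]
          rw [if_pos (⟨by omega, by omega⟩ : a ≤ a + m ∧ a + m < a + (m + 1)), if_pos hgt]
          rfl
        · rw [if_neg hgt, ihget _ hk, if_neg (by omega),
            if_pos (⟨by omega, by omega⟩ : a ≤ a + m ∧ a + m < a + (m + 1)), if_neg hgt]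
      · have hstep : (if row.getD (a + m) 0 > cs.getD (a + m) 0 then
            G.set (a + m) (row.getD (a + m) 0) else G).getD k 0 = G.getD k 0 := by
          split
          · rw [List.getD_eq_getElem?_getD, List.getElem?_set, if_neg (fun h => hkm h.symm),
              ← List.getD_eq_getElem?_getD]
          · rfl
        rw [hstep, ihget k hk]
        by_cases hak : a ≤ k ∧ k < a + m
        · have h2 : a ≤ k ∧ k < a + (m + 1) := ⟨hak.1, by omega⟩
          rw [if_pos hak, if_pos h2]
        · have h2 : ¬(a ≤ k ∧ k < a + (m + 1)) := by omega
          rw [if_neg hak, if_neg h2]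

-- pvColStep pointwise, via pvG_spec at a = 0
theorem pvColStep_spec (n : Nat) (cs row : List Int) (hcs : cs.length = n) :
    (pvColStep n cs row).length = n ∧
    ∀ k : Nat, k < n →
      (pvColStep n cs row).getD k 0 =
        if row.getD k 0 > cs.getD k 0 then row.getD k 0 else cs.getD k 0 := by
  have h := pvG_spec row n 0 cs
  rw [Nat.zero_add] at h
  have hps : pvColStep n cs row = (PySem.List.pyRange (0 : Nat) (n : Nat) 1).foldl (pvUpd row) cs := by
    rw [pvColStep_eq]; norm_num
  obtain ⟨hlen, hget⟩ := h
  refine ⟨by rw [hps, hlen, hcs], ?_⟩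
  intro k hkn
  rw [hps, hget k (by omega), if_pos ⟨Nat.zero_le k, hkn⟩]

-- folding pvColStep over the rows computes each column max independently
theorem pvFoldCols (n : Nat) :
    ∀ (Lr : List (List Int)) (cs : List Int), cs.length = n →
      (Lr.foldl (pvColStep n) cs).length = n ∧
      ∀ k : Nat, k < n →
        (Lr.foldl (pvColStep n) cs).getD k 0 =
          Lr.foldl (fun m row => if row.getD k 0 > m then row.getD k 0 else m) (cs.getD k 0) := by
  intro Lr
  induction Lr with
  | nil => intro cs hcs; exact ⟨hcs, fun k _ => rfl⟩
  | cons r rs ih =>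
    intro cs hcs
    obtain ⟨hlen1, hget1⟩ := pvColStep_spec n cs r hcs
    obtain ⟨hlen, hget⟩ := ih (pvColStep n cs r) hlen1
    refine ⟨hlen, ?_⟩
    intro k hkn
    rw [List.foldl_cons, hget k hkn, hget1 k hkn, List.foldl_cons]

-- the two column computations agree
theorem pvCols_eq (L : List (List Int)) (n : Nat) :
    (PySem.List.pyRange 0 (n : Int) 1).map (fun i => pvColF L i 0)
      = L.foldl (pvColStep n) (List.replicate n 0) := by
  obtain ⟨hlen, hget⟩ := pvFoldCols n L (List.replicate n 0) (List.length_replicate)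
  apply List.ext_getElem
  · rw [List.length_map, PySem.List.length_pyRange_one, hlen]; omega
  · intro k hk1 hk2
    have hkn : k < n := by
      have := hk1; rw [List.length_map, PySem.List.length_pyRange_one] at this; omega
    rw [List.getElem_map, PySem.List.getElem_pyRange_one]
    have hfold := hget k hkn
    rw [List.getD_eq_getElem?_getD, List.getElem?_eq_getElem hk2] at hfold
    simp only [Option.getD_some] at hfold
    rw [hfold]
    unfold pvColF
    have hrep : (List.replicate n (0 : Int)).getD k 0 = 0 := by
      rw [List.getD_eq_getElem?_getD, List.getElem?_replicate, if_pos hkn]; rfl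
    rw [hrep]
    have : (0 : Int) + (k : Int) = (k : Int) := by ring
    rw [this]
    simp [PySem.List.pyGetD_natCast]

theorem twoMaxes_equal : ∀ (L : List (List Int)), Pre_twoMaxes L → twoMaxes L = twoMaxes_alt L := by
  intro L _
  rw [pvA_eq, pvB_eq, pvCols_eq]

-- ===== VERDICT (by name: the statement is the Claim_ definition above) =====
theorem twoMaxes_spec : Claim_equal_twoMaxes := by
  intro L _ hPre
  exact twoMaxes_equal L hPre
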